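-- pv_equiv track=rewrite | github.com/bhagyakjain/debaised-analysis | intents/main.py | _get_all_column_labels
-- ===== SOURCE A (Python) =====
-- def _get_number_of_column_label(label):
--     """
--     This function returns a number which corresponds to the label.
--     Example : 'A' -> 1 , 'Z' -> 26 , 'AA' -> 27 , 'BA' -> 53
--
--     Args :
--         label : Type-str
--             Denotes the label given to the column by sheets
--     Returns :
--         num : Type-int
--             Denotes the numbering of columns(1-indexed)
--
--     """
--
--     num = 0
--     power_of_26 = 1
--
--     for i in range(len(label)-1,-1,-1):
--         value = ord(label[i]) - ord('A') + 1
--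
--         num += power_of_26*value
--
--         power_of_26 = 26*power_of_26
--
--     return num
--
-- def _get_label_from_number(num):
--     """
--     This function returns the label associated with the corresponding number
--     Example : 1 -> 'A' , 26 -> 'Z' , 27 -> 'AA' , 53 -> 'BA'
--
--     Args :
--         num : Type-int
--             Denotes the numbering of columns(1-indexed)
--     Returns :
--         label : Type-str
--             Denotes the label given to the column by sheets
--
--     """
--
--     label = ''
--
--     while(num > 0):
--         x = num % 26
--
--         if x == 0 :
--             label += 'Z'
--             num //= 26
--             num -= 1
--         else :
--             label += chr(x + ord('A') - 1)
--             num //= 26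
--
--     return label[::-1]
--
-- def _get_all_column_labels(rangeA1Notation):
--     """
--     This function returns a list which gives all the column labels present in the table
--
--     Args:
--         rangeA1Notation : Type-str
--                           Denotes the data range selected by user.
--                           Example : "A1:C18" , "AA1:CC33"
--     Returns:
--         List of all column labels where data is present.
--         Example : ['A','B','C']
--     """
--
--     starting_col = ""
--     ending_col = ""
--
--     starting_column_filled = False
--
--     for c in rangeA1Notation :
--         if c.isalpha():
--             if not starting_column_filled :
--                 starting_col += c
--             else :
--                 ending_col += c
--         else:
--             starting_column_filled = True
--
--     list_of_column_labels = []
--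
--     starting_col_label_number = _get_number_of_column_label(starting_col)
--     ending_col_label_number = _get_number_of_column_label(ending_col)
--
--     for label_number in range(starting_col_label_number, ending_col_label_number + 1) :
--         list_of_column_labels.append(_get_label_from_number(label_number))
--
--     return list_of_column_labels
-- ===== SOURCE B (Python) =====
-- def _get_all_column_labels(rangeA1Notation):
--     # Split: maximal alphabetic prefix is the start label; the remaining
--     # alphabetic characters form the end label.
--     i = 0
--     while i < len(rangeA1Notation) and rangeA1Notation[i].isalpha():
--         i += 1
--     starting_col = rangeA1Notation[:i]
--     ending_col = ''.join(c for c in rangeA1Notation[i:] if c.isalpha())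
--
--     s = _label_number(starting_col)
--     e = _label_number(ending_col)
--
--     if s > e:
--         return []
--
--     labels = []
--     current = _canonical_label(s)
--     for _ in range(e - s + 1):
--         labels.append(current)
--         current = _next_label(current)
--     return labels
--
-- def _label_number(label):
--     # Horner evaluation of the label as a bijective base-26 numeral.
--     n = 0
--     for c in label:
--         n = 26 * n + (ord(c) - ord('A') + 1)
--     return n
--
-- def _canonical_label(num):
--     # Canonical label of a number: collect letters least significant first.
--     digits = []
--     while num > 0:
--         num, r = divmod(num - 1, 26)
--         digits.append(chr(ord('A') + r))
--     return ''.join(reversed(digits))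
--
-- def _next_label(label):
--     # Odometer increment: trailing 'Z's carry.
--     if label == '':
--         return 'A'
--     if label[-1] != 'Z':
--         return label[:-1] + chr(ord(label[-1]) + 1)
--     return _next_label(label[:-1]) + 'A'
-- ===== Notes on version B (the rewrite author's own statement) =====
-- stated objective: alternative
-- what changed: B replaces A's per-element number-to-label divmod conversion by one conversion of the start label plus an odometer increment with carry on the trailing letters of the label string, and parses the range by splitting off the alphabetic prefix instead of a flag-carrying character loop.
import Mathlib
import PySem

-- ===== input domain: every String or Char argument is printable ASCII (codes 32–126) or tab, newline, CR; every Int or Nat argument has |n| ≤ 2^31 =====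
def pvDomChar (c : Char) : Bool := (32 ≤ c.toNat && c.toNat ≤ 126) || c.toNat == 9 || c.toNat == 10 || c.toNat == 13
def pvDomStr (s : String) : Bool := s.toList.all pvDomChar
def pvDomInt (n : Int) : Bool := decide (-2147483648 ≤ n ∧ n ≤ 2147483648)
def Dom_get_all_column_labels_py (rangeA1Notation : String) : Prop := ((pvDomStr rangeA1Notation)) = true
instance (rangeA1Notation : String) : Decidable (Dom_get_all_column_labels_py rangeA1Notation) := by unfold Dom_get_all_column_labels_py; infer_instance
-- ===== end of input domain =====

-- B replaces A's per-element number→label conversion by one conversion plus an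
-- odometer increment on the label string (objective: alternative algorithm).

-- ===== PORT A =====
-- _get_number_of_column_label: loop over indices len-1..0 = fold over the reversed label,
-- carrying (num, power_of_26).
def pvNumA (label : List Char) : Int :=
  (label.reverse.foldl
    (fun (st : Int × Int) c => (st.1 + st.2 * ((c.toNat : Int) - 65 + 1), 26 * st.2))
    (0, 1)).1

theorem pv_fd26_lt (num : Int) (h : 0 < num) :
    (PySem.Int.floordiv num 26).toNat < num.toNat := by
  rw [PySem.Int.floordiv_eq_ediv_of_pos (by norm_num)]; omega

theorem pv_fd26_sub_one_lt (num : Int) (h : 0 < num) :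
    (PySem.Int.floordiv num 26 - 1).toNat < num.toNat := by
  rw [PySem.Int.floordiv_eq_ediv_of_pos (by norm_num)]; omega

theorem pv_fd26_pred_lt (num : Int) (h : 0 < num) :
    (PySem.Int.floordiv (num - 1) 26).toNat < num.toNat := by
  rw [PySem.Int.floordiv_eq_ediv_of_pos (by norm_num)]; omega

-- _get_label_from_number: the while-loop accumulating characters (least significant
-- first), reversed at the end by the caller (label[::-1]).
def pvLabelLoopA (num : Int) (acc : List Char) : List Char :=
  if h : 0 < num then
    let x := PySem.Int.mod num 26
    if x = 0 then pvLabelLoopA (PySem.Int.floordiv num 26 - 1) (acc ++ ['Z'])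
    else pvLabelLoopA (PySem.Int.floordiv num 26) (acc ++ [Char.ofNat (x + 64).toNat])
  else acc
termination_by num.toNat
decreasing_by
  · exact pv_fd26_sub_one_lt num h
  · exact pv_fd26_lt num h

def pvLabelFromNumA (num : Int) : List Char := (pvLabelLoopA num []).reverse

-- the parsing loop of _get_all_column_labels: state (starting_col, ending_col, filled)
def pvStepA (st : List Char × List Char × Bool) (c : Char) : List Char × List Char × Bool :=
  if PySem.Chars.isalpha c then
    if st.2.2 = false then (st.1 ++ [c], st.2.1, st.2.2)
    else (st.1, st.2.1 ++ [c], st.2.2)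
  else (st.1, st.2.1, true)

def get_all_column_labels_py (rangeA1Notation : String) : List String :=
  let p := rangeA1Notation.toList.foldl pvStepA ([], [], false)
  let s := pvNumA p.1
  let e := pvNumA p.2.1
  (PySem.List.pyRange s (e + 1) 1).map (fun n => String.ofList (pvLabelFromNumA n))

-- ===== PORT B =====
-- the while loop of Source B: split off the maximal alphabetic prefix
def pvSplitB : List Char → List Char × List Char
  | [] => ([], [])
  | c :: cs =>
    if PySem.Chars.isalpha c then
      let p := pvSplitB cs
      (c :: p.1, p.2)
    else ([], c :: cs)

-- _label_number: Horner evaluation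
def pvNumB (label : List Char) : Int :=
  label.foldl (fun n c => 26 * n + ((c.toNat : Int) - 65 + 1)) 0

-- _canonical_label: while loop collecting letters least significant first, then reversed
def pvCanonLoopB (num : Int) (digits : List Char) : List Char :=
  if h : 0 < num then
    pvCanonLoopB (PySem.Int.floordiv (num - 1) 26)
      (digits ++ [Char.ofNat (65 + (PySem.Int.mod (num - 1) 26).toNat)])
  else digits
termination_by num.toNat
decreasing_by exact pv_fd26_pred_lt num h

def pvCanonB (num : Int) : List Char := (pvCanonLoopB num []).reverse

-- _next_label: odometer increment with carry on trailing final-alphabet letters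
def pvNextB (l : List Char) : List Char :=
  if hl : l = [] then ['A']
  else if l.getLast hl ≠ 'Z' then l.dropLast ++ [Char.ofNat ((l.getLast hl).toNat + 1)]
  else pvNextB l.dropLast ++ ['A']
termination_by l.length
decreasing_by
  have : 0 < l.length := List.length_pos_of_ne_nil hl
  simp [List.length_dropLast]
  omega

-- the generation loop: for _ in range(e - s + 1): append current; current = next(current)
def pvGenB (cur : List Char) : Nat → List (List Char)
  | 0 => []
  | k + 1 => cur :: pvGenB (pvNextB cur) k

def get_all_column_labels_py_alt (rangeA1Notation : String) : List String :=
  let sp := pvSplitB rangeA1Notation.toList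
  let ending := sp.2.filter (fun c => PySem.Chars.isalpha c)
  let s := pvNumB sp.1
  let e := pvNumB ending
  if s > e then []
  else (pvGenB (pvCanonB s) (e - s + 1).toNat).map String.ofList

-- ===== PRECONDITION & SPEC =====
def Spec_get_all_column_labels_py (rangeA1Notation : String) (out : List String) : Prop := out = get_all_column_labels_py_alt rangeA1Notation
instance (rangeA1Notation : String) (out : List String) : Decidable (Spec_get_all_column_labels_py rangeA1Notation out) := by unfold Spec_get_all_column_labels_py; infer_instance

-- ===== CLAIM (what is proved, stated in full; the proofs are below) =====
def Claim_equal_get_all_column_labels_py : Prop := ∀ (rangeA1Notation : String), Dom_get_all_column_labels_py rangeA1Notation → Spec_get_all_column_labels_py rangeA1Notation (get_all_column_labels_py rangeA1Notation)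

-- ===== LEMMAS AND PROOFS =====

-- proof-side characterisation of the canonical label, by structural recursion
def pvCanonAux (num : Int) : List Char :=
  if h : 0 < num then
    pvCanonAux (PySem.Int.floordiv (num - 1) 26) ++
      [Char.ofNat (65 + (PySem.Int.mod (num - 1) 26).toNat)]
  else []
termination_by num.toNat
decreasing_by exact pv_fd26_pred_lt num h

theorem pv_canonLoopB_eq (num : Int) : ∀ digits : List Char,
    pvCanonLoopB num digits = digits ++ (pvCanonAux num).reverse := by
  induction num using (WellFounded.induction (invImage Int.toNat Nat.lt_wfRel).wf) with
  | _ num ih =>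
    intro digits
    by_cases h : 0 < num
    · rw [pvCanonLoopB, pvCanonAux]
      simp only [h, dite_true]
      rw [ih _ (pv_fd26_pred_lt num h)]
      simp
    · rw [pvCanonLoopB, pvCanonAux]
      simp [h]

theorem pv_canonB_eq (num : Int) : pvCanonB num = pvCanonAux num := by
  rw [pvCanonB, pv_canonLoopB_eq]
  simp

-- parsing: once the flag is set, the rest contributes its alphabetic characters to ending_col
theorem pv_parseA_true (cs : List Char) : ∀ st en : List Char,
    cs.foldl pvStepA (st, en, true) =
      (st, en ++ cs.filter (fun c => PySem.Chars.isalpha c), true) := by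
  induction cs with
  | nil => simp
  | cons c cs ih =>
    intro st en
    by_cases h : PySem.Chars.isalpha c = true <;>
      simp [pvStepA, h, ih]

-- parsing: with the flag unset, A computes B's split (prefix / filtered rest)
theorem pv_parseA_false (cs : List Char) : ∀ st : List Char,
    ((cs.foldl pvStepA (st, [], false)).1,
     (cs.foldl pvStepA (st, [], false)).2.1) =
      (st ++ (pvSplitB cs).1,
       (pvSplitB cs).2.filter (fun c => PySem.Chars.isalpha c)) := by
  induction cs with
  | nil => simp [pvSplitB]
  | cons c cs ih =>
    intro st
    by_cases h : PySem.Chars.isalpha c = true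
    · simpa [pvStepA, pvSplitB, h] using ih (st ++ [c])
    · simp [pvStepA, pvSplitB, h, pv_parseA_true]

-- the two label→number routines agree (reversed power loop = Horner)
theorem pv_numA_go (cs : List Char) : ∀ n p : Int,
    cs.foldl
      (fun (st : Int × Int) c => (st.1 + st.2 * ((c.toNat : Int) - 65 + 1), 26 * st.2))
      (n, p) =
      (n + p * pvNumB cs.reverse, p * 26 ^ cs.length) := by
  induction cs with
  | nil => simp [pvNumB]
  | cons c cs ih =>
    intro n p
    have hrev : pvNumB (cs.reverse ++ [c]) = 26 * pvNumB cs.reverse + ((c.toNat : Int) - 65 + 1) := by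
      simp [pvNumB]
    simp only [List.foldl_cons, ih, List.reverse_cons, hrev, List.length_cons, Prod.mk.injEq]
    constructor <;> ring

theorem pv_num_eq (l : List Char) : pvNumA l = pvNumB l := by
  rw [pvNumA, pv_numA_go]
  simp

-- arithmetic bridges for the digit decomposition
theorem pv_digit_zero (n : Int) (h0 : 0 < n) (hm : PySem.Int.mod n 26 = 0) :
    PySem.Int.mod (n - 1) 26 = 25 ∧
    PySem.Int.floordiv (n - 1) 26 = PySem.Int.floordiv n 26 - 1 ∧ 26 ≤ n := by
  simp only [PySem.Int.mod_eq_emod_of_pos (a := n) (b := 26) (by norm_num : (0:Int) < 26),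
    PySem.Int.mod_eq_emod_of_pos (a := n - 1) (b := 26) (by norm_num : (0:Int) < 26),
    PySem.Int.floordiv_eq_ediv_of_pos (a := n) (b := 26) (by norm_num : (0:Int) < 26),
    PySem.Int.floordiv_eq_ediv_of_pos (a := n - 1) (b := 26) (by norm_num : (0:Int) < 26)] at hm ⊢
  refine ⟨by omega, by omega, by omega⟩

theorem pv_digit_pos (n : Int) (h0 : 0 < n) (hm : PySem.Int.mod n 26 ≠ 0) :
    PySem.Int.mod (n - 1) 26 = PySem.Int.mod n 26 - 1 ∧
    PySem.Int.floordiv (n - 1) 26 = PySem.Int.floordiv n 26 := by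
  simp only [PySem.Int.mod_eq_emod_of_pos (a := n) (b := 26) (by norm_num : (0:Int) < 26),
    PySem.Int.mod_eq_emod_of_pos (a := n - 1) (b := 26) (by norm_num : (0:Int) < 26),
    PySem.Int.floordiv_eq_ediv_of_pos (a := n) (b := 26) (by norm_num : (0:Int) < 26),
    PySem.Int.floordiv_eq_ediv_of_pos (a := n - 1) (b := 26) (by norm_num : (0:Int) < 26)] at hm ⊢
  refine ⟨by omega, by omega⟩

theorem pv_mod26_bounds (n : Int) : 0 ≤ PySem.Int.mod n 26 ∧ PySem.Int.mod n 26 < 26 :=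
  ⟨PySem.Int.mod_nonneg n (by norm_num), PySem.Int.mod_lt n (by norm_num)⟩

-- A's number→label loop computes the canonical label (reversed, after the accumulator)
theorem pv_labelLoopA_eq (num : Int) : ∀ acc : List Char,
    pvLabelLoopA num acc = acc ++ (pvCanonAux num).reverse := by
  induction num using (WellFounded.induction (invImage Int.toNat Nat.lt_wfRel).wf) with
  | _ num ih =>
    intro acc
    by_cases h : 0 < num
    · obtain ⟨hb0, hb1⟩ := pv_mod26_bounds num
      by_cases hx : PySem.Int.mod num 26 = 0
      · obtain ⟨hm, hd, h26⟩ := pv_digit_zero num h hx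
        rw [pvLabelLoopA, pvCanonAux]
        simp only [h, dite_true]
        rw [if_pos hx, hm, hd, ih _ (pv_fd26_sub_one_lt num h)]
        simp
      · obtain ⟨hm, hd⟩ := pv_digit_pos num h hx
        rw [pvLabelLoopA, pvCanonAux]
        simp only [h, dite_true]
        rw [if_neg hx, hm, hd, ih _ (pv_fd26_lt num h)]
        have hchar : Char.ofNat (PySem.Int.mod num 26 + 64).toNat =
            Char.ofNat (65 + (PySem.Int.mod num 26 - 1).toNat) := by
          congr 1; omega
        rw [hchar]
        simp
    · rw [pvLabelLoopA, pvCanonAux]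
      simp [h]

theorem pv_labelA_eq_canon (num : Int) : pvLabelFromNumA num = pvCanonAux num := by
  simp [pvLabelFromNumA, pv_labelLoopA_eq]

-- one step of the canonical-label recursion, for positive numbers
theorem pv_canon_decomp (n : Int) (h : 0 < n) :
    pvCanonAux n = pvCanonAux (PySem.Int.floordiv (n - 1) 26) ++
      [Char.ofNat (65 + (PySem.Int.mod (n - 1) 26).toNat)] := by
  rw [pvCanonAux]
  simp [h]

-- pvNextB on a label written as prefix ++ last letter
theorem pv_nextB_concat (xs : List Char) (c : Char) :
    pvNextB (xs ++ [c]) =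
      if c ≠ 'Z' then xs ++ [Char.ofNat (c.toNat + 1)] else pvNextB xs ++ ['A'] := by
  rw [pvNextB]
  have hne : xs ++ [c] ≠ [] := by simp
  simp only [hne, dite_false, List.getLast_concat, List.dropLast_concat]

theorem pv_char_toNat (m : Nat) (h : m < 1000) : (Char.ofNat m).toNat = m := by
  rw [Char.toNat_ofNat, if_pos (Or.inl (by omega))]

-- the odometer increment advances the canonical label by one
theorem pv_next_canon (n : Int) (h : 0 ≤ n) : pvNextB (pvCanonAux n) = pvCanonAux (n + 1) := by
  induction n using (WellFounded.induction (invImage Int.toNat Nat.lt_wfRel).wf) with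
  | _ n ih =>
    by_cases h0 : 0 < n
    · rw [pv_canon_decomp n h0, pv_nextB_concat]
      obtain ⟨hmb0, hmb1⟩ := pv_mod26_bounds (n - 1)
      by_cases hz : PySem.Int.mod n 26 = 0
      · obtain ⟨hm, hd, h26⟩ := pv_digit_zero n h0 hz
        have hcZ : Char.ofNat (65 + (PySem.Int.mod (n - 1) 26).toNat) = 'Z' := by
          rw [hm]; rfl
        rw [hcZ, if_neg (by simp)]
        have hq0 : 0 ≤ PySem.Int.floordiv (n - 1) 26 := by
          rw [PySem.Int.floordiv_eq_ediv_of_pos (by norm_num)]; omega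
        rw [ih _ (pv_fd26_pred_lt n h0) hq0, pv_canon_decomp (n + 1) (by omega)]
        have e0 : n + 1 - 1 = n := by ring
        have e1 : PySem.Int.floordiv (n - 1) 26 + 1 = PySem.Int.floordiv n 26 := by omega
        have e2 : (PySem.Int.mod n 26).toNat = 0 := by omega
        rw [e0, e1, e2]
      · obtain ⟨hm, hd⟩ := pv_digit_pos n h0 hz
        obtain ⟨hb0, hb1⟩ := pv_mod26_bounds n
        have hmv : (PySem.Int.mod (n - 1) 26).toNat = (PySem.Int.mod n 26).toNat - 1 := by
          omega
        have hcne : Char.ofNat (65 + (PySem.Int.mod (n - 1) 26).toNat) ≠ 'Z' := by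
          intro he
          have h90 := congrArg Char.toNat he
          rw [pv_char_toNat _ (by omega)] at h90
          have h90' : 65 + (PySem.Int.mod (n - 1) 26).toNat = 90 := h90
          omega
        rw [if_pos hcne, pv_canon_decomp (n + 1) (by omega)]
        have e0 : n + 1 - 1 = n := by ring
        have echar : Char.ofNat ((Char.ofNat (65 + (PySem.Int.mod (n - 1) 26).toNat)).toNat + 1)
            = Char.ofNat (65 + (PySem.Int.mod n 26).toNat) := by
          rw [pv_char_toNat _ (by omega)]
          congr 1
          omega
        rw [e0, ← hd, echar]
    · have hn0 : n = 0 := by omega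
      subst hn0
      have ez : pvCanonAux 0 = [] := by rw [pvCanonAux]; simp
      have e1 : pvCanonAux 1 = pvCanonAux (PySem.Int.floordiv 0 26) ++
          [Char.ofNat (65 + (PySem.Int.mod 0 26).toNat)] := by
        simpa using pv_canon_decomp 1 (by norm_num)
      have efd : PySem.Int.floordiv 0 26 = 0 := by
        rw [PySem.Int.floordiv_eq_ediv_of_pos (by norm_num)]
        simp
      have emd : PySem.Int.mod 0 26 = 0 := by
        rw [PySem.Int.mod_eq_emod_of_pos (by norm_num)]
        simp
      have e01 : (0 : Int) + 1 = 1 := by norm_num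
      rw [ez, e01, e1, efd, emd, ez, pvNextB]
      simp

-- generating by increment = mapping the canonical label over the integer range
theorem pv_gen_eq_map (k : Nat) : ∀ s : Int, 0 ≤ s →
    (PySem.List.pyRange s (s + k) 1).map pvCanonAux = pvGenB (pvCanonAux s) k := by
  induction k with
  | zero => intro s hs; simp [pvGenB, PySem.List.pyRange_one_eq_nil]
  | succ k ih =>
    intro s hs
    rw [PySem.List.pyRange_one_cons (by omega)]
    rw [List.map_cons, pvGenB]
    congr 1
    have : (s : Int) + (k + 1 : Nat) = (s + 1) + (k : Nat) := by push_cast; ring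
    rw [this, pv_next_canon s hs, ← ih (s + 1) (by omega)]

-- numbers of alphabetic labels are nonnegative
theorem pv_alpha_ge (c : Char) (h : PySem.Chars.isalpha c = true) : 65 ≤ c.toNat := by
  simp [PySem.Chars.isalpha, PySem.Chars.isupper, PySem.Chars.islower, Char.le_def] at h
  rcases h with ⟨h1, _⟩ | ⟨h1, _⟩
  · exact h1
  · exact Nat.le_of_add_left_le h1

theorem pv_numB_nonneg (l : List Char) (h : ∀ c ∈ l, PySem.Chars.isalpha c = true) :
    0 ≤ pvNumB l := by
  suffices H : ∀ n : Int, 0 ≤ n →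
      0 ≤ l.foldl (fun n c => 26 * n + ((c.toNat : Int) - 65 + 1)) n by
    exact H 0 le_rfl
  induction l with
  | nil => intro n hn; simpa using hn
  | cons c cs ih =>
    intro n hn
    simp only [List.foldl_cons]
    refine ih (fun d hd => h d (List.mem_cons_of_mem _ hd)) _ ?_
    have := pv_alpha_ge c (h c (List.mem_cons_self ..))
    have : (65 : Int) ≤ c.toNat := by exact_mod_cast this
    nlinarith

theorem pv_splitB_fst_alpha (cs : List Char) :
    ∀ c ∈ (pvSplitB cs).1, PySem.Chars.isalpha c = true := by
  induction cs with
  | nil => simp [pvSplitB]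
  | cons c cs ih =>
    intro d hd
    by_cases h : PySem.Chars.isalpha c = true
    · simp only [pvSplitB, h, if_pos, List.mem_cons] at hd
      rcases hd with rfl | hd
      · exact h
      · exact ih d hd
    · simp [pvSplitB, h] at hd

-- ===== VERDICT (by name: the statement is the Claim_ definition above) =====
theorem get_all_column_labels_py_spec : Claim_equal_get_all_column_labels_py := by
  intro r _
  simp only [Spec_get_all_column_labels_py, get_all_column_labels_py, get_all_column_labels_py_alt]
  have hp := pv_parseA_false r.toList []
  simp only [List.nil_append] at hp
  have h1 : (r.toList.foldl pvStepA ([], [], false)).1 = (pvSplitB r.toList).1 :=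
    congrArg Prod.fst hp
  have h2 : (r.toList.foldl pvStepA ([], [], false)).2.1 =
      (pvSplitB r.toList).2.filter (fun c => PySem.Chars.isalpha c) :=
    congrArg Prod.snd hp
  rw [h1, h2, pv_num_eq, pv_num_eq]
  set s := pvNumB (pvSplitB r.toList).1 with hs
  set e := pvNumB ((pvSplitB r.toList).2.filter (fun c => PySem.Chars.isalpha c)) with he
  have hs0 : 0 ≤ s := pv_numB_nonneg _ (pv_splitB_fst_alpha r.toList)
  have hmap : (PySem.List.pyRange s (e + 1) 1).map (fun n => String.ofList (pvLabelFromNumA n)) =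
      ((PySem.List.pyRange s (e + 1) 1).map pvCanonAux).map String.ofList := by
    rw [List.map_map]
    exact List.map_congr_left (fun n _ => by simp [pv_labelA_eq_canon])
  rw [hmap, pv_canonB_eq]
  by_cases hgt : s > e
  · rw [if_pos hgt, PySem.List.pyRange_one_eq_nil (by omega)]
    simp
  · rw [if_neg hgt]
    have : e + 1 = s + ((e - s + 1).toNat : Int) := by omega
    rw [this, pv_gen_eq_map _ s hs0]
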